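-- pv_equiv track=rewrite | github.com/wangqimeng0910/TCR-KCore | TCR/src/demo/KCore.py | compute_index
-- ===== SOURCE A (Python) =====
-- def compute_index(curr_est, nbr_est):
--     """
--     Compute current estimation for specified vertex. The coreness of node u is the largest value k such that k has at least k neighbors that belong to a k-core or a larger core.
--
--     :param int curr_est: core number estimation for the current node (u)
--     :param List[int] curr_est: core number estimations for the neighbors of the current node (u)
--     :return: new core number estimation for the current node (u)
--     """
--     count = [0 for _ in range(curr_est + 1)]
--     for v_est in nbr_est:
--         v_est = min(curr_est, v_est)
--         count[v_est] += 1
--     for i in range(curr_est - 1, 0, -1):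
--         count[i] += count[i + 1]
--     new_est = curr_est
--     while new_est > 1 and count[new_est] < new_est:
--         new_est -= 1
--     return new_est
-- ===== SOURCE B (Python) =====
-- def compute_index(curr_est, nbr_est):
--     """New coreness estimate for a node: the h-index of its neighbors'
--     estimates, each capped at the node's own current estimate."""
--     capped = sorted((min(curr_est, v) for v in nbr_est), reverse=True)
--     h = 0
--     while h < len(capped) and capped[h] > h:
--         h += 1
--     # the estimate never goes up, and it never drops below the 1-core
--     return min(curr_est, max(h, 1))
-- ===== Notes on version B (the rewrite author's own statement) =====
-- stated objective: alternative
-- what changed: B drops A's count/suffix-sum array and top-down while loop: it sorts the capped neighbor estimates in descending order and reads off the h-index directly, clamped into [1, curr_est]; Pre_ restricts to the natural domain of nonnegative coreness estimates, outside which A raises IndexError or counts a negative estimate in a high bucket through negative list indexing.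
-- outside the precondition, e.g. on compute_index(3, [-1, -1, -1, 2]): A returns 3, B returns 1; on compute_index(-2, [1]): A raises IndexError, B returns -2; on compute_index(2, [-5]): A raises IndexError, B returns 1
import Mathlib
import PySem

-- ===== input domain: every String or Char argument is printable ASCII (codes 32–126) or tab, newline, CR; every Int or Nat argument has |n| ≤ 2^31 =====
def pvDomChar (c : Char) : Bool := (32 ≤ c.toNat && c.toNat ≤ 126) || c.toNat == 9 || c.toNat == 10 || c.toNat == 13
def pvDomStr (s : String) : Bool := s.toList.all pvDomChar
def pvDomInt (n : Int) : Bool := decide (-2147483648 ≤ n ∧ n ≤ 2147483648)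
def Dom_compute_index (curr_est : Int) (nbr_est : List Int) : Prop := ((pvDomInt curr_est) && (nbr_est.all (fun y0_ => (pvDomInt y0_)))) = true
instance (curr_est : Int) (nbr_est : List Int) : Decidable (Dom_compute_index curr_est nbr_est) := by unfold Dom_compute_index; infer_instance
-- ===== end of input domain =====

-- B replaces A's histogram + suffix-sum array and top-down scan by sorting the capped
-- estimates descending and reading off the h-index directly, clamped into [1, curr_est];
-- same cost class, different algorithm.

-- ===== PORT A =====
-- while new_est > 1 and count[new_est] < new_est: new_est -= 1
def aWhile (count : List Int) (new_est : Int) : Int :=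
  if h : 1 < new_est ∧ PySem.List.pyGetD count new_est 0 < new_est then
    aWhile count (new_est - 1)
  else new_est
termination_by new_est.toNat
decreasing_by omega

def compute_index (curr_est : Int) (nbr_est : List Int) : Int :=
  -- count = [0 for _ in range(curr_est + 1)]
  let count0 := (PySem.List.pyRange 0 (curr_est + 1) 1).map (fun _ => (0 : Int))
  -- for v_est in nbr_est: v_est = min(curr_est, v_est); count[v_est] += 1
  let count1 := nbr_est.foldl (fun cnt v_est =>
      let w := min curr_est v_est
      PySem.List.pySetD cnt w (PySem.List.pyGetD cnt w 0 + 1)) count0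
  -- for i in range(curr_est - 1, 0, -1): count[i] += count[i + 1]
  let count2 := (PySem.List.pyRange (curr_est - 1) 0 (-1)).foldl (fun cnt i =>
      PySem.List.pySetD cnt i (PySem.List.pyGetD cnt i 0 + PySem.List.pyGetD cnt (i + 1) 0)) count1
  aWhile count2 curr_est

-- ===== PORT B =====
-- while h < len(capped) and capped[h] > h: h += 1
def bWhile (s : List Int) (h : Int) : Int :=
  if hc : h < PySem.List.len s ∧ h < PySem.List.pyGetD s h 0 then
    bWhile s (h + 1)
  else h
termination_by (PySem.List.len s - h).toNat
decreasing_by simp [PySem.List.len_eq] at hc ⊢; omega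

def compute_index_alt (curr_est : Int) (nbr_est : List Int) : Int :=
  let capped := PySem.List.sorted (nbr_est.map (fun v => min curr_est v)) (fun x => x) true
  min curr_est (max (bWhile capped 0) 1)

-- ===== PRECONDITION & SPEC =====
-- Pre_ restricts to the natural domain of coreness estimates — a nonnegative current
-- estimate and nonnegative neighbor estimates. Outside it A either raises IndexError
-- (negative curr_est with neighbors, or a neighbor estimate below -(curr_est+1)) or
-- counts a negative estimate in a high bucket through negative list indexing.
def Pre_compute_index (curr_est : Int) (nbr_est : List Int) : Prop :=
  0 ≤ curr_est ∧ ∀ v ∈ nbr_est, 0 ≤ v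
instance (curr_est : Int) (nbr_est : List Int) : Decidable (Pre_compute_index curr_est nbr_est) := by
  unfold Pre_compute_index; infer_instance

def pvWitness_compute_index : Int × List Int := (3, [1, 4, 2, 3])

def Spec_compute_index (curr_est : Int) (nbr_est : List Int) (out : Int) : Prop := out = compute_index_alt curr_est nbr_est
instance (curr_est : Int) (nbr_est : List Int) (out : Int) : Decidable (Spec_compute_index curr_est nbr_est out) := by unfold Spec_compute_index; infer_instance

-- ===== CLAIM (what is proved, stated in full; the proofs are below) =====
def Claim_equal_compute_index : Prop := ∀ (curr_est : Int) (nbr_est : List Int), Dom_compute_index curr_est nbr_est → Pre_compute_index curr_est nbr_est → Spec_compute_index curr_est nbr_est (compute_index curr_est nbr_est)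

-- ===== LEMMAS AND PROOFS =====

-- pyGetD after pySetD, Int indices in range
theorem pv_getset (cnt : List Int) (w j x : Int) (hw0 : 0 ≤ w)
    (hj0 : 0 ≤ j) (hj : j < (cnt.length : Int)) :
    PySem.List.pyGetD (PySem.List.pySetD cnt w x) j 0 = if j = w then x else PySem.List.pyGetD cnt j 0 := by
  rw [PySem.List.pySetD_of_nonneg cnt x hw0]
  rw [PySem.List.pyGetD_eq_getElem _ _ hj0 (by rw [List.length_set]; exact hj),
      PySem.List.pyGetD_eq_getElem _ _ hj0 hj]
  rw [List.getElem_set]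
  by_cases h : j = w
  · simp [h]
  · have : w.toNat ≠ j.toNat := by omega
    simp [this, h]

-- length preserved by the histogram fold
theorem pv_hist_len (c : Int) : ∀ (m : List Int) (cnt : List Int),
    (m.foldl (fun cnt v_est =>
      let w := min c v_est
      PySem.List.pySetD cnt w (PySem.List.pyGetD cnt w 0 + 1)) cnt).length = cnt.length := by
  intro m
  induction m with
  | nil => intro cnt; rfl
  | cons v t ih =>
    intro cnt
    simp only [List.foldl_cons]
    rw [ih]
    simp [PySem.List.length_pySetD]

-- histogram fold: pointwise value (the bucket of v is min c v, in [0, c] on Pre_)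
theorem pv_hist_get (c : Int) (hc : 0 ≤ c) : ∀ (m : List Int), (∀ v ∈ m, 0 ≤ v) →
    ∀ (cnt : List Int), cnt.length = (c + 1).toNat →
    ∀ (j : Int), 0 ≤ j → j ≤ c →
    PySem.List.pyGetD (m.foldl (fun cnt v_est =>
      let w := min c v_est
      PySem.List.pySetD cnt w (PySem.List.pyGetD cnt w 0 + 1)) cnt) j 0
      = PySem.List.pyGetD cnt j 0
        + ((m.countP (fun v => decide (min c v = j)) : Nat) : Int) := by
  intro m
  induction m with
  | nil => intro _ cnt _ j _ _; simp
  | cons v t ih =>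
    intro hm cnt hlen j hj0 hjc
    simp only [List.foldl_cons]
    have hv0 : 0 ≤ v := hm v (by simp)
    have hw0 : 0 ≤ min c v := by omega
    have hwc : min c v ≤ c := min_le_left _ _
    have hclen : (cnt.length : Int) = c + 1 := by omega
    rw [ih (fun x hx => hm x (List.mem_cons_of_mem _ hx)) _ (by rw [PySem.List.length_pySetD]; exact hlen) j hj0 hjc]
    rw [pv_getset cnt (min c v) j _ hw0 hj0 (by omega)]
    rw [List.countP_cons]
    by_cases h : min c v = j
    · rw [if_pos h.symm, if_pos (by rw [h]; simp), h]
      push_cast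
      ring
    · rw [if_neg (fun hh => h hh.symm), if_neg (by simp [h])]
      push_cast
      ring

-- length preserved by the suffix fold
theorem pv_suf_len : ∀ (l : List Int) (cnt : List Int),
    (l.foldl (fun cnt i =>
      PySem.List.pySetD cnt i (PySem.List.pyGetD cnt i 0 + PySem.List.pyGetD cnt (i + 1) 0)) cnt).length = cnt.length := by
  intro l
  induction l with
  | nil => intro cnt; rfl
  | cons a t ih =>
    intro cnt
    simp only [List.foldl_cons]
    rw [ih]
    simp [PySem.List.length_pySetD]

-- suffix fold: turns per-value counts into suffix counts
theorem pv_suf (c : Int) (Ceq Cge : Int → Int)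
    (hstep : ∀ i : Int, 1 ≤ i → i ≤ c - 1 → Ceq i + Cge (i + 1) = Cge i) :
    ∀ (n : Nat) (cnt : List Int), cnt.length = (c + 1).toNat → (n : Int) ≤ c - 1 →
    (∀ l : Int, (n : Int) < l → l ≤ c → PySem.List.pyGetD cnt l 0 = Cge l) →
    (∀ l : Int, 0 ≤ l → l ≤ (n : Int) → PySem.List.pyGetD cnt l 0 = Ceq l) →
    ∀ l : Int, 1 ≤ l → l ≤ c →
    PySem.List.pyGetD ((PySem.List.pyRange (n : Int) 0 (-1)).foldl (fun cnt i =>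
      PySem.List.pySetD cnt i (PySem.List.pyGetD cnt i 0 + PySem.List.pyGetD cnt (i + 1) 0)) cnt) l 0 = Cge l := by
  intro n
  induction n with
  | zero =>
    intro cnt hlen hn inv1 inv2 l hl1 hlc
    rw [PySem.List.pyRange_neg_one_eq_nil (by omega)]
    exact inv1 l (by omega) hlc
  | succ k ih =>
    intro cnt hlen hn inv1 inv2 l hl1 hlc
    rw [PySem.List.pyRange_neg_one_cons (by push_cast; omega)]
    simp only [List.foldl_cons]
    have hcast : ((k + 1 : Nat) : Int) = (k : Int) + 1 := by push_cast; ring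
    rw [hcast]
    have hsub : ((k : Int) + 1 - 1) = (k : Int) := by ring
    rw [hsub]
    set cnt' := PySem.List.pySetD cnt ((k : Int) + 1)
        (PySem.List.pyGetD cnt ((k : Int) + 1) 0 + PySem.List.pyGetD cnt ((k : Int) + 1 + 1) 0) with hcnt'
    have hlen' : cnt'.length = (c + 1).toNat := by
      rw [hcnt', PySem.List.length_pySetD, hlen]
    have hget' : ∀ (j : Int), 0 ≤ j → j ≤ c →
        PySem.List.pyGetD cnt' j 0 = if j = (k : Int) + 1
          then PySem.List.pyGetD cnt ((k : Int) + 1) 0 + PySem.List.pyGetD cnt ((k : Int) + 1 + 1) 0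
          else PySem.List.pyGetD cnt j 0 := by
      intro j hj0 hjc
      exact pv_getset cnt _ j _ (by omega) hj0 (by rw [hlen]; omega)
    have hval : PySem.List.pyGetD cnt' ((k : Int) + 1) 0 = Cge ((k : Int) + 1) := by
      rw [hget' _ (by omega) (by push_cast at hn ⊢; omega)]
      rw [if_pos rfl]
      rw [inv2 ((k : Int) + 1) (by omega) (by push_cast at hn ⊢; omega),
          inv1 ((k : Int) + 1 + 1) (by push_cast at hn ⊢; omega) (by push_cast at hn ⊢; omega)]
      exact hstep _ (by omega) (by push_cast at hn; omega)
    apply ih cnt' hlen' (by push_cast at hn ⊢; omega)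
    · intro l hl hlc'
      by_cases hcase : l = (k : Int) + 1
      · rw [hcase]; exact hval
      · rw [hget' l (by omega) hlc', if_neg hcase]
        exact inv1 l (by omega) hlc'
    · intro l hl0 hlk
      rw [hget' l hl0 (by omega), if_neg (by omega)]
      exact inv2 l hl0 (by omega)
    · exact hl1
    · exact hlc

-- the initial all-zeros list
theorem pv_zeros_get (c : Int) (j : Int) (hj0 : 0 ≤ j) (hjc : j ≤ c) :
    PySem.List.pyGetD ((PySem.List.pyRange 0 (c + 1) 1).map (fun _ => (0 : Int))) j 0 = 0 := by
  rw [PySem.List.pyGetD_eq_getElem _ _ hj0 (by simp [PySem.List.length_pyRange_one]; omega)]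
  simp

theorem pv_zeros_len (c : Int) :
    ((PySem.List.pyRange 0 (c + 1) 1).map (fun _ => (0 : Int))).length = (c + 1).toNat := by
  simp [PySem.List.length_pyRange_one]

-- bWhile: full characterisation of the stopping index
theorem pv_bWhile_spec : ∀ (n : Nat) (s : List Int) (k : Int),
    ((s.length : Int) - k).toNat = n → 0 ≤ k → k ≤ (s.length : Int) →
    k ≤ bWhile s k ∧ bWhile s k ≤ (s.length : Int) ∧
    (∀ i : Int, k ≤ i → i < bWhile s k → i < PySem.List.pyGetD s i 0) ∧
    (bWhile s k = (s.length : Int) ∨ PySem.List.pyGetD s (bWhile s k) 0 ≤ bWhile s k) := by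
  intro n
  induction n with
  | zero =>
    intro s k hn hk0 hklen
    have hk : k = (s.length : Int) := by omega
    rw [bWhile]
    rw [dif_neg (by simp [PySem.List.len_eq]; omega)]
    refine ⟨le_refl _, by omega, ?_, Or.inl hk⟩
    intro i h1 h2; omega
  | succ m ih =>
    intro s k hn hk0 hklen
    have hklt : k < (s.length : Int) := by omega
    rw [bWhile]
    by_cases hcond : k < PySem.List.pyGetD s k 0
    · rw [dif_pos ⟨by simp [PySem.List.len_eq]; omega, hcond⟩]
      obtain ⟨h1, h2, h3, h4⟩ := ih s (k + 1) (by omega) (by omega) (by omega)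
      refine ⟨by omega, h2, ?_, h4⟩
      intro i hi1 hi2
      by_cases hik : i = k
      · rw [hik]; exact hcond
      · exact h3 i (by omega) hi2
    · rw [dif_neg (by intro h; exact hcond h.2)]
      refine ⟨le_refl _, by omega, ?_, Or.inr (by omega)⟩
      intro i h1 h2; omega

-- on a descending list, a large prefix element forces many elements ≥ x
theorem pv_desc_count_ge : ∀ (s : List Int), s.Pairwise (fun a b => b ≤ a) →
    ∀ (n : Nat) (h : n < s.length) (x : Int), x ≤ s[n] →
    n + 1 ≤ s.countP (fun v => decide (x ≤ v)) := by
  intro s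
  induction s with
  | nil => intro _ n h; simp at h
  | cons a t ih =>
    intro hp n h x hx
    have ha : ∀ b ∈ t, b ≤ a := (List.pairwise_cons.mp hp).1
    have ht : t.Pairwise (fun a b => b ≤ a) := (List.pairwise_cons.mp hp).2
    cases n with
    | zero =>
      simp at hx
      rw [List.countP_cons]
      simp [hx]
    | succ m =>
      have hm : m < t.length := by simpa using h
      have hxt : x ≤ t[m] := by simpa using hx
      have := ih ht m hm x hxt
      have hxa : x ≤ a := le_trans hxt (ha _ (List.getElem_mem hm))
      rw [List.countP_cons]
      simp [hxa]
      omega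

-- on a descending list, a small element bounds the count of elements ≥ x
theorem pv_desc_count_lt : ∀ (s : List Int), s.Pairwise (fun a b => b ≤ a) →
    ∀ (n : Nat) (h : n < s.length) (x : Int), s[n] < x →
    s.countP (fun v => decide (x ≤ v)) ≤ n := by
  intro s
  induction s with
  | nil => intro _ n h; simp at h
  | cons a t ih =>
    intro hp n h x hx
    have ha : ∀ b ∈ t, b ≤ a := (List.pairwise_cons.mp hp).1
    have ht : t.Pairwise (fun a b => b ≤ a) := (List.pairwise_cons.mp hp).2
    cases n with
    | zero =>
      simp at hx
      have : (a :: t).countP (fun v => decide (x ≤ v)) = 0 := by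
        rw [List.countP_eq_zero]
        intro b hb
        simp only [List.mem_cons] at hb
        rcases hb with rfl | hb
        · simp; omega
        · have := ha b hb; simp; omega
      omega
    | succ m =>
      have hm : m < t.length := by simpa using h
      have hxt : t[m] < x := by simpa using hx
      have := ih ht m hm x hxt
      rw [List.countP_cons]
      by_cases hxa : x ≤ a
      · simp [hxa]; omega
      · simp [hxa]; omega

-- aWhile descends to the h-index (floored at 1)
theorem pv_aWhile (cnt : List Int) (R : Int) (hR1 : 1 ≤ R)
    (hstop : R = 1 ∨ R ≤ PySem.List.pyGetD cnt R 0)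
    (hfail : ∀ k : Int, R < k → PySem.List.pyGetD cnt k 0 < k) :
    ∀ (n : Nat), aWhile cnt (R + (n : Int)) = R := by
  intro n
  induction n with
  | zero =>
    simp only [Nat.cast_zero, add_zero]
    rw [aWhile]
    rcases hstop with h1 | h2
    · rw [dif_neg (by omega)]
    · rw [dif_neg (by omega)]
  | succ m ih =>
    push_cast
    rw [aWhile]
    rw [dif_pos ⟨by omega, hfail (R + ((m : Int) + 1)) (by omega)⟩]
    have heq : R + ((m : Int) + 1) - 1 = R + (m : Int) := by ring
    rw [heq]
    exact ih

-- countP splitting: "≥ i" = "= i" + "≥ i+1" for the capped values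
theorem pv_count_split (c : Int) (i : Int) : ∀ (m : List Int),
    m.countP (fun v => decide (min c v = i))
      + m.countP (fun v => decide (i + 1 ≤ min c v))
      = m.countP (fun v => decide (i ≤ min c v)) := by
  intro m
  induction m with
  | nil => simp
  | cons a t ih =>
    rw [List.countP_cons, List.countP_cons, List.countP_cons]
    simp only [decide_eq_true_eq]
    split_ifs <;> omega

-- "= c" equals "≥ c" for the capped values (they are ≤ c)
theorem pv_count_top (c : Int) (m : List Int) :
    m.countP (fun v => decide (min c v = c))
      = m.countP (fun v => decide (c ≤ min c v)) := by
  apply List.countP_congr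
  intro a _
  have hle : min c a ≤ c := min_le_left _ _
  by_cases h : min c a = c
  · simp [h]
  · have h2 : ¬ c ≤ min c a := by omega
    simp [h, h2]

-- main equivalence
theorem pv_main (c : Int) (nbr : List Int) (hc : 0 ≤ c) (h2 : ∀ v ∈ nbr, 0 ≤ v) :
    compute_index c nbr = compute_index_alt c nbr := by
  by_cases hc1 : c < 1
  · -- c = 0 : both sides return 0
    have hc' : c = 0 := by omega
    subst hc'
    rw [compute_index, compute_index_alt]
    simp only
    rw [aWhile, dif_neg (by omega)]
    have h1 : (1 : Int) ≤ max (bWhile (PySem.List.sorted (nbr.map (fun v => min 0 v)) (fun x => x) true) 0) 1 :=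
      le_max_right _ _
    omega
  · -- main case : 1 ≤ c
    have hc1' : 1 ≤ c := by omega
    -- B side
    have hBeq : compute_index_alt c nbr
        = min c (max (bWhile (PySem.List.sorted (nbr.map (fun v => min c v)) (fun x => x) true) 0) 1) := rfl
    rw [hBeq]
    set s := PySem.List.sorted (nbr.map (fun v => min c v)) (fun x => x) true with hs
    have hperm : s.Perm (nbr.map (fun v => min c v)) := PySem.List.sorted_perm _ _ _
    have hdesc : s.Pairwise (fun a b => b ≤ a) := PySem.List.sorted_pairwise_rev _ _
    have hsmem : ∀ v ∈ s, v ≤ c := by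
      intro v hv
      have : v ∈ nbr.map (fun v => min c v) := hperm.mem_iff.mp hv
      obtain ⟨w, _, rfl⟩ := List.mem_map.mp this
      exact min_le_left _ _
    have hcount : ∀ x : Int, s.countP (fun v => decide (x ≤ v))
        = nbr.countP (fun v => decide (x ≤ min c v)) := by
      intro x
      rw [hperm.countP_eq, List.countP_map]
      rfl
    have hNnn : (0 : Int) ≤ (s.length : Int) := by positivity
    obtain ⟨hr0, hrN, hpre, hstop⟩ := pv_bWhile_spec ((s.length : Int) - 0).toNat s 0 rfl (le_refl 0) hNnn
    set r := bWhile s 0 with hr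
    -- r ≤ c
    have hrc : r ≤ c := by
      by_cases h : r < 1
      · omega
      · have hlt : r - 1 < (s.length : Int) := by omega
        have h0 : (0:Int) ≤ r - 1 := by omega
        have h3 := hpre (r - 1) (by omega) (by omega)
        rw [PySem.List.pyGetD_eq_getElem _ _ h0 (by omega)] at h3
        have hmem := List.getElem_mem (l := s) (n := (r-1).toNat) (by omega)
        have h4 := hsmem _ hmem
        omega
    -- above r, suffix counts are too small
    have hCge : ∀ k : Int, 1 ≤ k → r < k →
        (nbr.countP (fun v => decide (k ≤ min c v)) : Int) < k := by
      intro k hk1 hrk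
      rw [← hcount]
      rcases hstop with hA | hB
      · have : s.countP (fun v => decide (k ≤ v)) ≤ s.length := List.countP_le_length
        omega
      · by_cases hrlt : r < (s.length : Int)
        · have h0r : (0:Int) ≤ r := hr0
          rw [PySem.List.pyGetD_eq_getElem _ _ h0r (by omega)] at hB
          have := pv_desc_count_lt s hdesc r.toNat (by omega) k (by omega)
          omega
        · have : s.countP (fun v => decide (k ≤ v)) ≤ s.length := List.countP_le_length
          omega
    -- at r (when 1 ≤ r), the suffix count is large enough
    have hCgeR : 1 ≤ r → (r : Int) ≤ (nbr.countP (fun v => decide (r ≤ min c v)) : Int) := by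
      intro hr1
      rw [← hcount]
      have hlt : (r - 1).toNat < s.length := by omega
      have := hpre (r - 1) (by omega) (by omega)
      rw [PySem.List.pyGetD_eq_getElem _ _ (by omega) (by omega)] at this
      have := pv_desc_count_ge s hdesc (r - 1).toNat hlt r (by
        have : ((r - 1).toNat : Int) = r - 1 := by omega
        omega)
      omega
    -- A side
    rw [compute_index]
    simp only
    set count0 := (PySem.List.pyRange 0 (c + 1) 1).map (fun _ => (0 : Int)) with hcount0
    set count1 := nbr.foldl (fun cnt v_est =>
      let w := min c v_est
      PySem.List.pySetD cnt w (PySem.List.pyGetD cnt w 0 + 1)) count0 with hcount1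
    have hlen1 : count1.length = (c + 1).toNat := by
      rw [hcount1, pv_hist_len, pv_zeros_len]
    have hget1 : ∀ j : Int, 0 ≤ j → j ≤ c →
        PySem.List.pyGetD count1 j 0
          = ((nbr.countP (fun v => decide (min c v = j)) : Nat) : Int) := by
      intro j hj0 hjc
      rw [hcount1, pv_hist_get c (by omega) nbr h2 count0 (pv_zeros_len c) j hj0 hjc,
          pv_zeros_get c j hj0 hjc]
      ring
    have hgetF : ∀ l : Int, 1 ≤ l → l ≤ c →
        PySem.List.pyGetD ((PySem.List.pyRange (c - 1) 0 (-1)).foldl (fun cnt i =>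
          PySem.List.pySetD cnt i (PySem.List.pyGetD cnt i 0 + PySem.List.pyGetD cnt (i + 1) 0)) count1) l 0
          = ((nbr.countP (fun v => decide (l ≤ min c v)) : Nat) : Int) := by
      have hceq : ((c - 1).toNat : Int) = c - 1 := by omega
      intro l hl1 hlc
      rw [← hceq]
      apply pv_suf c
        (fun i => ((nbr.countP (fun v => decide (min c v = i)) : Nat) : Int))
        (fun i => ((nbr.countP (fun v => decide (i ≤ min c v)) : Nat) : Int))
      · intro i _ _
        have := pv_count_split c i nbr
        omega
      · exact hlen1
      · omega
      · intro l' hl' hlc'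
        have hlc'' : l' = c := by omega
        rw [hget1 l' (by omega) (by omega), hlc'']
        norm_cast
        exact pv_count_top c nbr
      · intro l' h0 hl'
        exact hget1 l' h0 (by omega)
      · exact hl1
      · exact hlc
    -- combine via pv_aWhile
    set R := max r 1 with hR
    have hR1 : 1 ≤ R := le_max_right _ _
    have hRc : R ≤ c := by omega
    set count2 := (PySem.List.pyRange (c - 1) 0 (-1)).foldl (fun cnt i =>
      PySem.List.pySetD cnt i (PySem.List.pyGetD cnt i 0 + PySem.List.pyGetD cnt (i + 1) 0)) count1 with hcount2
    have hfin : aWhile count2 c = R := by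
      have hcR : c = R + ((c - R).toNat : Int) := by omega
      rw [hcR]
      apply pv_aWhile
      · exact hR1
      · by_cases h : r < 1
        · left; omega
        · right
          have hReq : R = r := by omega
          rw [hReq, hcount2, hgetF r (by omega) hrc]
          exact hCgeR (by omega)
      · intro k hk
        by_cases hkc : k ≤ c
        · rw [hcount2, hgetF k (by omega) hkc]
          exact hCge k (by omega) (by omega)
        · -- k > c : out of range, pyGetD gives default 0
          rw [hcount2]
          have hlen2 : ((PySem.List.pyRange (c - 1) 0 (-1)).foldl (fun cnt i =>
            PySem.List.pySetD cnt i (PySem.List.pyGetD cnt i 0 + PySem.List.pyGetD cnt (i + 1) 0)) count1).length = (c + 1).toNat := by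
            rw [pv_suf_len, hlen1]
          rw [PySem.List.pyGetD_of_none]
          · omega
          · rw [PySem.List.pyGet?_eq_none_iff]
            simp [PySem.Raise.InRange, hlen2]
            omega
    rw [hfin]
    omega

-- ===== VERDICT (by name: the statement is the Claim_ definition above) =====
theorem compute_index_spec : Claim_equal_compute_index := by
  intro c nbr _ hpre
  unfold Spec_compute_index
  exact pv_main c nbr hpre.1 hpre.2
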